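-- pv_equiv track=rewrite | github.com/pramoth87/Practice | Google.py | calc_drone_min_energy
-- ===== SOURCE A (Python) =====
-- def calc_drone_min_energy(route):
--   ans = 0
--   Tank = 0
--   for i in range(len(route)-1):#check boundary for last
--     if route[i+1][2] <= route[i][2]:#next step is goind down, need not worry about fuel
--       Tank += route[i][2] - route[i+1][2]
--     else:
--       fuel_needed = route[i+1][2] - route[i][2]
--
--       if Tank >= fuel_needed: # dont worry and fly
--         Tank = Tank - fuel_needed
--       else:
--         ans += fuel_needed - Tank
--         Tank = 0
--
--   return ans
-- ===== SOURCE B (Python) =====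
-- def calc_drone_min_energy(route):
--   if not route:
--     return 0
--   start = route[0][2]
--   return max(0, max(p[2] for p in route) - start)
-- ===== Notes on version B (the rewrite author's own statement) =====
-- stated objective: simpler
-- what changed: Replaces the stepwise tank simulation with the closed form max(0, max altitude - starting altitude).
import Mathlib
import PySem

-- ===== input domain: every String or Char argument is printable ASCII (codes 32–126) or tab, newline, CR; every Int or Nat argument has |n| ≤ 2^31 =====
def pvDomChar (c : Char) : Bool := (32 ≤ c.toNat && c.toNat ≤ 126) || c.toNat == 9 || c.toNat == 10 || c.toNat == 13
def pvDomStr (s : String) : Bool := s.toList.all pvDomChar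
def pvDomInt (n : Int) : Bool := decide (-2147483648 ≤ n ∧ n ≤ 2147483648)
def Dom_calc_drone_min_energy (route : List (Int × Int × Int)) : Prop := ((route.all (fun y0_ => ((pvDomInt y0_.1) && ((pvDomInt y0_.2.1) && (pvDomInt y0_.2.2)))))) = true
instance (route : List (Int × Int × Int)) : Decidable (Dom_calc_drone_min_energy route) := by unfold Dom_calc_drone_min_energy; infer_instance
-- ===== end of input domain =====

-- B replaces A's stepwise tank simulation with the closed form max(0, max altitude - start altitude); objective: simpler.
-- ===== PORT A =====
-- loop over consecutive pairs, state (ans, Tank), branches in A's order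
def pvGoA : Int → List (Int × Int × Int) → Int → Int → Int
  | _, [], ans, _ => ans
  | prev, p :: rest, ans, tank =>
    if p.2.2 ≤ prev then
      pvGoA p.2.2 rest ans (tank + (prev - p.2.2))
    else
      let fuel_needed := p.2.2 - prev
      if tank ≥ fuel_needed then
        pvGoA p.2.2 rest ans (tank - fuel_needed)
      else
        pvGoA p.2.2 rest (ans + (fuel_needed - tank)) 0

def calc_drone_min_energy (route : List (Int × Int × Int)) : Int :=
  match route with
  | [] => 0
  | p :: rest => pvGoA p.2.2 rest 0 0

-- ===== PORT B =====
-- B: closed form max(0, max altitude - starting altitude)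
def calc_drone_min_energy_alt (route : List (Int × Int × Int)) : Int :=
  match route with
  | [] => 0
  | p :: rest => max 0 ((rest.foldl (fun m q => max m q.2.2) p.2.2) - p.2.2)

-- ===== PRECONDITION & SPEC =====
def Spec_calc_drone_min_energy (route : List (Int × Int × Int)) (out : Int) : Prop := out = calc_drone_min_energy_alt route
instance (route : List (Int × Int × Int)) (out : Int) : Decidable (Spec_calc_drone_min_energy route out) := by unfold Spec_calc_drone_min_energy; infer_instance

-- ===== CLAIM (what is proved, stated in full; the proofs are below) =====
def Claim_equal_calc_drone_min_energy : Prop := ∀ (route : List (Int × Int × Int)), Dom_calc_drone_min_energy route → Spec_calc_drone_min_energy route (calc_drone_min_energy route)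

-- ===== LEMMAS AND PROOFS =====

theorem fmax_ge (a : Int) (l : List (Int × Int × Int)) :
    a ≤ l.foldl (fun m q => max m q.2.2) a := by
  induction l generalizing a with
  | nil => simp
  | cons q rest ih =>
    simp only [List.foldl]
    exact le_trans (le_max_left a q.2.2) (ih _)

theorem fmax_max (a b : Int) (l : List (Int × Int × Int)) :
    l.foldl (fun m q => max m q.2.2) (max a b) = max a (l.foldl (fun m q => max m q.2.2) b) := by
  induction l generalizing b with
  | nil => simp
  | cons q rest ih =>
    simp only [List.foldl, max_assoc]
    exact ih _

theorem pvGoA_closed (rest : List (Int × Int × Int)) :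
    ∀ (prev ans tank : Int), 0 ≤ tank →
    pvGoA prev rest ans tank = max ans (ans + (rest.foldl (fun m q => max m q.2.2) prev) - tank - prev) := by
  induction rest with
  | nil => intro prev ans tank h; simp [pvGoA]; omega
  | cons p rest ih =>
    intro prev ans tank h
    have hge := fmax_ge p.2.2 rest
    simp only [pvGoA, List.foldl]
    by_cases h1 : p.2.2 ≤ prev
    · rw [if_pos h1, ih _ _ _ (by omega), fmax_max]
      omega
    · rw [if_neg h1]
      simp only [ge_iff_le]
      rw [fmax_max]
      by_cases h2 : p.2.2 - prev ≤ tank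
      · rw [if_pos h2, ih _ _ _ (by omega)]; omega
      · rw [if_neg h2, ih _ _ _ (by omega)]; omega

-- ===== VERDICT (by name: the statement is the Claim_ definition above) =====
theorem calc_drone_min_energy_spec : Claim_equal_calc_drone_min_energy := by
  intro route _
  unfold Spec_calc_drone_min_energy calc_drone_min_energy calc_drone_min_energy_alt
  cases route with
  | nil => rfl
  | cons p rest =>
    show pvGoA p.2.2 rest 0 0 = max 0 ((rest.foldl (fun m q => max m q.2.2) p.2.2) - p.2.2)
    rw [pvGoA_closed rest p.2.2 0 0 le_rfl]
    have := fmax_ge p.2.2 rest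
    omega
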